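-- pv_equiv track=rewrite | github.com/Glumgam/agent | main.py | repeated_run
-- ===== SOURCE A (Python) =====
-- def repeated_run(history):
--
--     runs = [
--         h for h in history
--         if h.get("action", {}).get("tool") in ("run", "run_test")
--     ]
--
--     if len(runs) < 2:
--         return False
--
--     last = runs[-1]["action"].get("command") or ""
--     prev = runs[-2]["action"].get("command") or ""
--
--     return last == prev
-- ===== SOURCE B (Python) =====
-- def repeated_run(history):
--     found = None
--     for h in reversed(history):
--         action = h.get("action", {})
--         if action.get("tool") in ("run", "run_test"):
--             cmd = action.get("command") or ""
--             if found is None: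
--                 found = cmd
--             else:
--                 return found == cmd
--     return False
-- ===== Notes on version B (the rewrite author's own statement) =====
-- stated objective: alternative
-- what changed: Instead of building the full filtered list of run entries and indexing [-1]/[-2], B scans the history once in reverse keeping only the most recent run command and returns as soon as a second match is found.
import Mathlib
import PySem

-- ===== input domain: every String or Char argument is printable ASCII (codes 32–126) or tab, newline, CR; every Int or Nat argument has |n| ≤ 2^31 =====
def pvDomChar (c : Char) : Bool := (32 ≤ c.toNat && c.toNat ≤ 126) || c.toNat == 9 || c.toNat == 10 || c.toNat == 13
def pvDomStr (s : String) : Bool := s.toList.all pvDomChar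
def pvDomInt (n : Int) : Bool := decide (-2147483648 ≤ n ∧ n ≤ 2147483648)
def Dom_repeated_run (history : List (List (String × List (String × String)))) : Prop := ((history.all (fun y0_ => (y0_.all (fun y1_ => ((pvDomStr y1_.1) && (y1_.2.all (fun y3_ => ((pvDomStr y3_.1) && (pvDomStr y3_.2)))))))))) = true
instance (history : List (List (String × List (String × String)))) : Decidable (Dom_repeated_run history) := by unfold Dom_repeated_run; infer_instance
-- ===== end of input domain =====

-- B replaces A's filter-then-index-from-the-end with a single reverse scan that keeps only the
-- most recent run command and returns as soon as a second run entry is seen (objective: alternative).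

-- ===== PORT A =====
-- h.get("action", {})   (entries inside `runs` always carry "action", so runs[-k]["action"] = actionOf runs[-k])
def actionOf (h : List (String × List (String × String))) : List (String × String) :=
  ((PySem.Dict.mk h).get? "action").getD []

-- the list-comprehension filter:  h.get("action", {}).get("tool") in ("run", "run_test")
def isRunEntry (h : List (String × List (String × String))) : Bool :=
  match (PySem.Dict.mk (actionOf h)).get? "tool" with
  | some t => t == "run" || t == "run_test"
  | none => false

-- action.get("command") or ""   (values are strings, so the `or` only turns None into "")
def cmdOf (h : List (String × List (String × String))) : String :=
  ((PySem.Dict.mk (actionOf h)).get? "command").getD ""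

def repeated_run (history : List (List (String × List (String × String)))) : Bool :=
  let runs := history.filter isRunEntry
  if runs.length < 2 then false
  else
    let last := cmdOf ((PySem.List.pyGet? runs (-1)).getD [])
    let prev := cmdOf ((PySem.List.pyGet? runs (-2)).getD [])
    last == prev

-- ===== PORT B =====
-- the reverse loop of Source B; `found` is the accumulator
def rbScan : List (List (String × List (String × String))) → Option String → Bool
  | [], _ => false
  | h :: t, found =>
    let action := ((PySem.Dict.mk h).get? "action").getD []
    match (PySem.Dict.mk action).get? "tool" with
    | some tl =>
      if tl == "run" || tl == "run_test" then
        let cmd := ((PySem.Dict.mk action).get? "command").getD ""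
        match found with
        | none => rbScan t (some cmd)
        | some c => c == cmd
      else rbScan t found
    | none => rbScan t found

def repeated_run_alt (history : List (List (String × List (String × String)))) : Bool :=
  rbScan history.reverse none

-- ===== PRECONDITION & SPEC =====
def Spec_repeated_run (history : List (List (String × List (String × String)))) (out : Bool) : Prop := out = repeated_run_alt history
instance (history : List (List (String × List (String × String)))) (out : Bool) : Decidable (Spec_repeated_run history out) := by unfold Spec_repeated_run; infer_instance

-- ===== CLAIM (what is proved, stated in full; the proofs are below) =====
def Claim_equal_repeated_run : Prop := ∀ (history : List (List (String × List (String × String)))), Dom_repeated_run history → Spec_repeated_run history (repeated_run history)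

-- ===== LEMMAS AND PROOFS =====

theorem rbScan_step (h : List (String × List (String × String)))
    (t : List (List (String × List (String × String)))) (found : Option String) :
    rbScan (h :: t) found =
      if isRunEntry h then
        match found with
        | none => rbScan t (some (cmdOf h))
        | some c => (c == cmdOf h)
      else rbScan t found := by
  simp only [rbScan, isRunEntry, cmdOf, actionOf]
  cases (PySem.Dict.mk (((PySem.Dict.mk h).get? "action").getD [])).get? "tool" with
  | none => simp
  | some tl => by_cases htl : (tl == "run" || tl == "run_test") = true <;> simp [htl]

theorem rbScan_some (l : List (List (String × List (String × String)))) (c : String) :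
    rbScan l (some c) =
      match l.filter isRunEntry with
      | a :: _ => (c == cmdOf a)
      | [] => false := by
  induction l with
  | nil => simp [rbScan]
  | cons h t ih =>
    rw [rbScan_step]
    by_cases hp : isRunEntry h = true <;> simp [hp, ih]

theorem rbScan_none (l : List (List (String × List (String × String)))) :
    rbScan l none =
      match l.filter isRunEntry with
      | a :: b :: _ => (cmdOf a == cmdOf b)
      | _ => false := by
  induction l with
  | nil => simp [rbScan]
  | cons h t ih =>
    rw [rbScan_step]
    by_cases hp : isRunEntry h = true <;> simp [hp, ih, rbScan_some]
    cases List.filter isRunEntry t <;> simp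

-- ===== VERDICT (by name: the statement is the Claim_ definition above) =====
theorem repeated_run_spec : Claim_equal_repeated_run := by
  intro history _
  show repeated_run history = repeated_run_alt history
  unfold repeated_run repeated_run_alt
  rw [rbScan_none, List.filter_reverse]
  set rs := history.filter isRunEntry with hrs
  by_cases hlen : rs.length < 2
  · -- fewer than two runs: reverse has length < 2, both sides false
    simp only [hlen, if_true]
    match hrev : rs.reverse with
    | [] => simp
    | [a] => simp
    | a :: b :: t =>
      exfalso
      have : 2 ≤ rs.reverse.length := by rw [hrev]; simp
      rw [List.length_reverse] at this; omega
  · simp only [hlen, if_false]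
    have h2 : 2 ≤ rs.length := by omega
    match hrev : rs.reverse with
    | [] => exfalso; have := List.length_reverse (as := rs); rw [hrev] at this; simp at this; omega
    | [a] => exfalso; have := List.length_reverse (as := rs); rw [hrev] at this; simp at this; omega
    | a :: b :: t =>
      have hlast : PySem.List.pyGet? rs (-1) = some a := by
        rw [PySem.List.pyGet?_neg_one, ← List.head?_reverse, hrev]; rfl
      have hprev : PySem.List.pyGet? rs (-2) = some b := by
        rw [PySem.List.pyGet?_neg_ofNat rs 2 (by omega) h2]
        have : rs[rs.length - 2]? = rs.reverse[1]? := by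
          rw [List.getElem?_reverse (by omega)]
          congr 1
        rw [this, hrev]
        rfl
      simp [hlast, hprev]
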